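-- pv_equiv track=rewrite | github.com/yfzzzyyls/Design_and_Verification_Projects | prepare_calibre_extract_source.py | rewrite_top_subckt_for_sram
-- ===== SOURCE A (Python) =====
-- from typing import List, Set, Tuple
--
-- def rewrite_top_subckt_for_sram(top_text: str, macro_pin_map: dict) -> str:
--     out: List[str] = []
--     lines = top_text.splitlines()
--     i = 0
--     while i < len(lines):
--         line = lines[i]
--         stripped = line.strip()
--         if stripped.startswith("X") and " $PINS " in stripped:
--             original_block = [line.rstrip()]
--             parse_block = [stripped]
--             i += 1
--             while i < len(lines) and lines[i].lstrip().startswith("+"):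
--                 original_block.append(lines[i].rstrip())
--                 parse_block.append(lines[i].lstrip()[1:].strip())
--                 i += 1
--             joined = " ".join(parse_block)
--             tokens = joined.split()
--             if len(tokens) >= 3:
--                 inst = tokens[0]
--                 cell = tokens[1]
--                 if cell in macro_pin_map and tokens[2] == "$PINS":
--                     named = {}
--                     for tok in tokens[3:]:
--                         if "=" not in tok:
--                             continue
--                         pin, net = tok.split("=", 1)
--                         named[pin] = net
--                     ordered_nets = [named.get(pin, pin) for pin in macro_pin_map[cell]]
--                     chunk = [inst] + ordered_nets + [cell]
--                     width = 12
--                     out.append(" ".join(chunk[:width]))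
--                     for start in range(width, len(chunk), width):
--                         out.append("+ " + " ".join(chunk[start:start + width]))
--                     continue
--             out.extend(original_block)
--             continue
--         out.append(line.rstrip())
--         i += 1
--     return "\n".join(out) + "\n"
-- ===== SOURCE B (Python) =====
-- def _render_block(block, macro_pin_map):
--     first, *conts = block
--     tokens = " ".join([first.strip()] + [l.lstrip()[1:].strip() for l in conts]).split()
--     if len(tokens) >= 3:
--         inst, cell, marker = tokens[0], tokens[1], tokens[2]
--         if cell in macro_pin_map and marker == "$PINS":
--             named = dict(t.split("=", 1) for t in tokens[3:] if "=" in t)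
--             chunk = [inst] + [named.get(p, p) for p in macro_pin_map[cell]] + [cell]
--             return [" ".join(chunk[:12])] + ["+ " + " ".join(chunk[j:j + 12])
--                                             for j in range(12, len(chunk), 12)]
--     return [l.rstrip() for l in block]
--
--
-- def rewrite_top_subckt_for_sram(top_text: str, macro_pin_map: dict) -> str:
--     # phase 1: segment the lines into logical units (plain line, or X/$PINS block)
--     units = []
--     pending = None
--     for line in top_text.splitlines():
--         s = line.strip()
--         if pending is not None and line.lstrip().startswith("+"):
--             pending.append(line)
--             continue
--         if pending is not None:
--             units.append(pending)
--             pending = None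
--         if s.startswith("X") and " $PINS " in s:
--             pending = [line]
--         else:
--             units.append(line)
--     if pending is not None:
--         units.append(pending)
--     # phase 2: render each unit
--     out = []
--     for u in units:
--         if isinstance(u, list):
--             out.extend(_render_block(u, macro_pin_map))
--         else:
--             out.append(u.rstrip())
--     return "\n".join(out) + "\n"
-- ===== Notes on version B (the rewrite author's own statement) =====
-- stated objective: alternative
-- what changed: A's index-driven while-loop with a nested continuation-collecting scan and inline formatting is replaced by a two-phase pipeline: a state-machine segmenter that walks the lines once and groups them into logical units (plain line, or X/$PINS block with its '+' continuations), followed by a pure per-unit renderer.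
import Mathlib
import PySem

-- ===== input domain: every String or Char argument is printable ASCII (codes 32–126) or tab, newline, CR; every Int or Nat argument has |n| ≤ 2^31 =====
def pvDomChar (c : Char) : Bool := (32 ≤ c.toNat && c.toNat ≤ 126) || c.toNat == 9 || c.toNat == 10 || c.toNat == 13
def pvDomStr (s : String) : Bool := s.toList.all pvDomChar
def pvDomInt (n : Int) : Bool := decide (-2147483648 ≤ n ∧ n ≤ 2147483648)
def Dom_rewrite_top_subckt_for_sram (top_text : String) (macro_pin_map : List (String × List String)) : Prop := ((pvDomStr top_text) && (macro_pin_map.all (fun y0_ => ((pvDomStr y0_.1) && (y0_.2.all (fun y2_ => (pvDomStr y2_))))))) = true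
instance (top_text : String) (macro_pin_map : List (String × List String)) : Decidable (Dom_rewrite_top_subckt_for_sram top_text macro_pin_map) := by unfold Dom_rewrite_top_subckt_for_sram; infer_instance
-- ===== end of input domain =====

-- B restructures A's index-driven while-loop into a two-phase pipeline (a state-machine
-- segmenter producing logical units, then a pure per-unit renderer); same cost, alternative
-- decomposition. The dict parameter is an association list; lookup is first-match.

-- ===== PORT A =====
-- inner `while i < len(lines) and lines[i].lstrip().startswith("+")` collector:
-- returns (original_block tail, parse_block tail, remaining lines)
def pvCollectA : List String → List String × List String × List String
  | [] => ([], [], [])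
  | l :: ls =>
    if PySem.Str.startswith (PySem.Str.lstrip l) "+" then
      let r := pvCollectA ls
      (PySem.Str.rstrip l :: r.1,
       PySem.Str.strip (PySem.Str.slice (PySem.Str.lstrip l) (some 1) none) :: r.2.1,
       r.2.2)
    else ([], [], l :: ls)

-- termination measure for the outer while-loop (cited by pvGoA's decreasing_by)
theorem pvCollectA_len_le (ls : List String) : (pvCollectA ls).2.2.length ≤ ls.length := by
  induction ls with
  | nil => simp [pvCollectA]
  | cons l ls ih =>
    rw [pvCollectA]
    split
    · simpa using Nat.le_trans ih (Nat.le_succ _)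
    · simp

-- the outer `while i < len(lines)` loop of A, as structural recursion on the remaining lines
def pvGoA (mpm : List (String × List String)) : List String → List String
  | [] => []
  | line :: rest =>
    let stripped := PySem.Str.strip line
    if PySem.Str.startswith stripped "X" && PySem.Str.isIn " $PINS " stripped then
      let c := pvCollectA rest
      let original_block := PySem.Str.rstrip line :: c.1
      let parse_block := stripped :: c.2.1
      let tokens := PySem.Str.split₀ (PySem.Str.join " " parse_block)
      let res :=
        if 3 ≤ tokens.length then
          let inst := PySem.List.pyGetD tokens 0 ""
          let cell := PySem.List.pyGetD tokens 1 ""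
          if (mpm.find? (fun p => p.1 == cell)).isSome && (PySem.List.pyGetD tokens 2 "" == "$PINS") then
            let named := (PySem.List.slice tokens (some 3) none).foldl
              (fun d tok =>
                if PySem.Str.isIn "=" tok then
                  match PySem.Str.splitMax? tok "=" 1 with
                  | some (pin :: net :: _) => d.insert pin net
                  | _ => d
                else d) (PySem.Dict.empty (κ := String) (ν := String))
            let pins := ((mpm.find? (fun p => p.1 == cell)).map (·.2)).getD []
            let chunk := inst :: (pins.map (fun pin => named.getD pin pin) ++ [cell])
            PySem.Str.join " " (PySem.List.slice chunk none (some 12)) ::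
              (PySem.List.pyRange 12 (chunk.length : Int) 12).foldl
                (fun acc st => acc ++ ["+ " ++ PySem.Str.join " " (PySem.List.slice chunk (some st) (some (st + 12)))]) []
          else original_block
        else original_block
      res ++ pvGoA mpm c.2.2
    else PySem.Str.rstrip line :: pvGoA mpm rest
  termination_by ls => ls.length
  decreasing_by
  · exact Nat.lt_succ_of_le (pvCollectA_len_le rest)
  · simp

def rewrite_top_subckt_for_sram (top_text : String) (macro_pin_map : List (String × List String)) : String :=
  PySem.Str.join "\n" (pvGoA macro_pin_map (PySem.Str.splitlines top_text)) ++ "\n"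

-- ===== PORT B =====
-- phase 2: render one logical unit that is an X/$PINS block (list of its raw lines)
def pvRenderB (mpm : List (String × List String)) (ls : List String) : List String :=
  match ls with
  | [] => []
  | first :: conts =>
    let tokens := PySem.Str.split₀ (PySem.Str.join " "
      (PySem.Str.strip first ::
        conts.map (fun l => PySem.Str.strip (PySem.Str.slice (PySem.Str.lstrip l) (some 1) none))))
    match tokens with
    | inst :: cell :: marker :: restT =>
      if (mpm.find? (fun p => p.1 == cell)).isSome && (marker == "$PINS") then
        let named := (restT.filterMap (fun tok =>
            if PySem.Str.isIn "=" tok then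
              match PySem.Str.splitMax? tok "=" 1 with
              | some (pin :: net :: _) => some (pin, net)
              | _ => none
            else none)).foldl (fun d pr => d.insert pr.1 pr.2) (PySem.Dict.empty (κ := String) (ν := String))
        let pins := ((mpm.find? (fun p => p.1 == cell)).map (·.2)).getD []
        let chunk := inst :: (pins.map (fun pin => named.getD pin pin) ++ [cell])
        PySem.Str.join " " (PySem.List.slice chunk none (some 12)) ::
          (PySem.List.pyRange 12 (chunk.length : Int) 12).map
            (fun st => "+ " ++ PySem.Str.join " " (PySem.List.slice chunk (some st) (some (st + 12))))
      else ls.map PySem.Str.rstrip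
    | _ => ls.map PySem.Str.rstrip

-- phase 1: one step of the segmenter state machine (units so far, pending block)
def pvSegStepB (st : List (Sum String (List String)) × Option (List String)) (line : String) :
    List (Sum String (List String)) × Option (List String) :=
  let s := PySem.Str.strip line
  if st.2.isSome && PySem.Str.startswith (PySem.Str.lstrip line) "+" then
    (st.1, st.2.map (· ++ [line]))
  else
    let units := st.1 ++ (match st.2 with | some p => [Sum.inr p] | none => [])
    if PySem.Str.startswith s "X" && PySem.Str.isIn " $PINS " s then
      (units, some [line])
    else (units ++ [Sum.inl line], none)

def rewrite_top_subckt_for_sram_alt (top_text : String) (macro_pin_map : List (String × List String)) : String :=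
  let st := (PySem.Str.splitlines top_text).foldl pvSegStepB ([], none)
  let units := st.1 ++ (match st.2 with | some p => [Sum.inr p] | none => [])
  PySem.Str.join "\n"
    (units.flatMap (fun u =>
      match u with
      | Sum.inl l => [PySem.Str.rstrip l]
      | Sum.inr b => pvRenderB macro_pin_map b)) ++ "\n"

-- ===== PRECONDITION & SPEC =====
def Spec_rewrite_top_subckt_for_sram (top_text : String) (macro_pin_map : List (String × List String)) (out : String) : Prop := out = rewrite_top_subckt_for_sram_alt top_text macro_pin_map
instance (top_text : String) (macro_pin_map : List (String × List String)) (out : String) : Decidable (Spec_rewrite_top_subckt_for_sram top_text macro_pin_map out) := by unfold Spec_rewrite_top_subckt_for_sram; infer_instance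

-- ===== CLAIM (what is proved, stated in full; the proofs are below) =====
def Claim_equal_rewrite_top_subckt_for_sram : Prop := ∀ (top_text : String) (macro_pin_map : List (String × List String)), Dom_rewrite_top_subckt_for_sram top_text macro_pin_map → Spec_rewrite_top_subckt_for_sram top_text macro_pin_map (rewrite_top_subckt_for_sram top_text macro_pin_map)

-- ===== LEMMAS AND PROOFS =====

-- the three line classifiers both programs use
def pvPred (l : String) : Bool := PySem.Str.startswith (PySem.Str.lstrip l) "+"
def pvIsX (l : String) : Bool :=
  PySem.Str.startswith (PySem.Str.strip l) "X" && PySem.Str.isIn " $PINS " (PySem.Str.strip l)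

theorem pvCollectA_eq (ls : List String) :
    pvCollectA ls = ((ls.takeWhile pvPred).map PySem.Str.rstrip,
      (ls.takeWhile pvPred).map (fun l => PySem.Str.strip (PySem.Str.slice (PySem.Str.lstrip l) (some 1) none)), ls.dropWhile pvPred) := by
  induction ls with
  | nil => simp [pvCollectA]
  | cons l ls ih =>
    rw [pvCollectA]
    by_cases h : pvPred l = true
    · rw [if_pos (by simpa [pvPred] using h)]
      simp [h, ih]
    · rw [if_neg (by simpa [pvPred] using h)]
      simp [h]

-- the reference segmentation that B's fold computes
def pvSegR : List String → List (Sum String (List String))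
  | [] => []
  | l :: ls =>
    if pvIsX l then
      Sum.inr (l :: ls.takeWhile pvPred) :: pvSegR (ls.dropWhile pvPred)
    else Sum.inl l :: pvSegR ls
  termination_by ls => ls.length
  decreasing_by
  · exact Nat.lt_succ_of_le (List.length_dropWhile_le _ _)
  · simp

theorem pvSegR_cons_X (l : String) (ls : List String) (h : pvIsX l = true) :
    pvSegR (l :: ls) = Sum.inr (l :: ls.takeWhile pvPred) :: pvSegR (ls.dropWhile pvPred) := by
  rw [pvSegR, if_pos h]

theorem pvSegR_cons_nonX (l : String) (ls : List String) (h : ¬ pvIsX l = true) :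
    pvSegR (l :: ls) = Sum.inl l :: pvSegR ls := by
  rw [pvSegR, if_neg h]

def pvFlush : Option (List String) → List (Sum String (List String))
  | some p => [Sum.inr p]
  | none => []

theorem pvSegFold (lines : List String) :
    ∀ (units : List (Sum String (List String))) (pending : Option (List String)),
      (lines.foldl pvSegStepB (units, pending)).1 ++ pvFlush (lines.foldl pvSegStepB (units, pending)).2 =
        units ++ (match pending with
          | none => pvSegR lines
          | some p => Sum.inr (p ++ lines.takeWhile pvPred) :: pvSegR (lines.dropWhile pvPred)) := by
  induction lines with
  | nil =>
    intro units pending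
    cases pending <;> simp [pvFlush, pvSegR]
  | cons l ls ih =>
    intro units pending
    simp only [List.foldl_cons]
    rcases pending with _ | p
    · by_cases hx : pvIsX l = true
      · have hx' := hx; simp only [pvIsX] at hx'
        have hstep : pvSegStepB (units, none) l = (units, some [l]) := by
          simp only [pvSegStepB, Option.isSome_none, Bool.false_and]
          rw [if_neg (by simp), if_pos hx']
          simp
        rw [hstep, ih units (some [l]), pvSegR_cons_X _ _ hx]
        simp
      · have hx' := hx; simp only [pvIsX] at hx'
        have hstep : pvSegStepB (units, none) l = (units ++ [Sum.inl l], none) := by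
          simp only [pvSegStepB, Option.isSome_none, Bool.false_and]
          rw [if_neg (by simp), if_neg hx']
          simp
        rw [hstep, ih (units ++ [Sum.inl l]) none, pvSegR_cons_nonX _ _ hx]
        simp
    · by_cases hp : pvPred l = true
      · have hp' := hp; simp only [pvPred] at hp'
        have hstep : pvSegStepB (units, some p) l = (units, some (p ++ [l])) := by
          simp only [pvSegStepB, Option.isSome_some, Bool.true_and]
          rw [if_pos hp']
          rfl
        rw [hstep, ih units (some (p ++ [l]))]
        rw [List.takeWhile_cons, List.dropWhile_cons, if_pos hp, if_pos hp]
        simp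
      · have hp' := hp; simp only [pvPred] at hp'
        by_cases hx : pvIsX l = true
        · have hx' := hx; simp only [pvIsX] at hx'
          have hstep : pvSegStepB (units, some p) l = (units ++ [Sum.inr p], some [l]) := by
            simp only [pvSegStepB, Option.isSome_some, Bool.true_and]
            rw [if_neg hp', if_pos hx']
          rw [hstep, ih (units ++ [Sum.inr p]) (some [l])]
          rw [List.takeWhile_cons, List.dropWhile_cons, if_neg hp, if_neg hp,
            pvSegR_cons_X _ _ hx]
          simp
        · have hx' := hx; simp only [pvIsX] at hx'
          have hstep : pvSegStepB (units, some p) l = (units ++ [Sum.inr p, Sum.inl l], none) := by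
            simp only [pvSegStepB, Option.isSome_some, Bool.true_and]
            rw [if_neg hp', if_neg hx']
            simp
          rw [hstep, ih (units ++ [Sum.inr p, Sum.inl l]) none]
          rw [List.takeWhile_cons, List.dropWhile_cons, if_neg hp, if_neg hp,
            pvSegR_cons_nonX _ _ hx]
          simp

-- the dict-building loops of the two renderers agree
theorem pvNamed_eq (xs : List String) (d : PySem.Dict String String) :
    xs.foldl (fun d tok =>
        if PySem.Str.isIn "=" tok then
          match PySem.Str.splitMax? tok "=" 1 with
          | some (pin :: net :: _) => d.insert pin net
          | _ => d
        else d) d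
      = (xs.filterMap (fun tok =>
          if PySem.Str.isIn "=" tok then
            match PySem.Str.splitMax? tok "=" 1 with
            | some (pin :: net :: _) => some (pin, net)
            | _ => none
          else none)).foldl (fun d pr => d.insert pr.1 pr.2) d := by
  induction xs generalizing d with
  | nil => rfl
  | cons x xs ih =>
    simp only [List.foldl_cons, List.filterMap_cons]
    by_cases h : PySem.Str.isIn "=" x = true
    · rw [if_pos h, if_pos h]
      rcases hs : PySem.Str.splitMax? x "=" 1 with _ | ⟨_ | ⟨pin, _ | ⟨net, r⟩⟩⟩ <;>
        exact ih _
    · rw [if_neg h, if_neg h]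
      exact ih _

-- per-block: A's inline rendering equals B's pvRenderB
theorem pvBlock_eq (mpm : List (String × List String)) (line : String) (cont : List String) :
    (let stripped := PySem.Str.strip line
     let original_block := PySem.Str.rstrip line :: cont.map PySem.Str.rstrip
     let tokens := PySem.Str.split₀ (PySem.Str.join " " (stripped :: cont.map (fun l => PySem.Str.strip (PySem.Str.slice (PySem.Str.lstrip l) (some 1) none))))
     if 3 ≤ tokens.length then
       let inst := PySem.List.pyGetD tokens 0 ""
       let cell := PySem.List.pyGetD tokens 1 ""
       if (mpm.find? (fun p => p.1 == cell)).isSome && (PySem.List.pyGetD tokens 2 "" == "$PINS") then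
         let named := (PySem.List.slice tokens (some 3) none).foldl
           (fun d tok =>
             if PySem.Str.isIn "=" tok then
               match PySem.Str.splitMax? tok "=" 1 with
               | some (pin :: net :: _) => d.insert pin net
               | _ => d
             else d) (PySem.Dict.empty (κ := String) (ν := String))
         let pins := ((mpm.find? (fun p => p.1 == cell)).map (·.2)).getD []
         let chunk := inst :: (pins.map (fun pin => named.getD pin pin) ++ [cell])
         PySem.Str.join " " (PySem.List.slice chunk none (some 12)) ::
           (PySem.List.pyRange 12 (chunk.length : Int) 12).foldl
             (fun acc st => acc ++ ["+ " ++ PySem.Str.join " " (PySem.List.slice chunk (some st) (some (st + 12)))]) []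
       else original_block
     else original_block)
    = pvRenderB mpm (line :: cont) := by
  simp only [pvRenderB]
  rcases htk : PySem.Str.split₀ (PySem.Str.join " "
      (PySem.Str.strip line ::
        cont.map (fun l => PySem.Str.strip (PySem.Str.slice (PySem.Str.lstrip l) (some 1) none))))
    with _ | ⟨a, _ | ⟨b, _ | ⟨c, r⟩⟩⟩
  · simp
  · simp
  · simp
  · rw [if_pos (by simp only [List.length_cons]; omega)]
    have h0 : PySem.List.pyGetD (a :: b :: c :: r) 0 "" = a := by
      simp [PySem.List.pyGetD_ofNat' (a :: b :: c :: r) 0 ""]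
    have h1 : PySem.List.pyGetD (a :: b :: c :: r) 1 "" = b := by
      simpa using PySem.List.pyGetD_ofNat' (a :: b :: c :: r) 1 ""
    have h2 : PySem.List.pyGetD (a :: b :: c :: r) 2 "" = c := by
      simpa using PySem.List.pyGetD_ofNat' (a :: b :: c :: r) 2 ""
    have h3 : PySem.List.slice (a :: b :: c :: r) (some 3) none = r := by
      rw [PySem.List.slice_from _ (by norm_num)]
      simp
    rw [h0, h1, h2, h3]
    by_cases hc : ((mpm.find? (fun p => p.1 == b)).isSome && (c == "$PINS")) = true
    · rw [if_pos hc, pvNamed_eq, PySem.List.foldl_append_singleton_eq_map]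
      simp only [List.nil_append]
      have hc' := hc
      simp only [Bool.and_eq_true] at hc'
      simp [hc'.1, hc'.2]
    · rw [if_neg hc]
      have hc' := hc
      simp only [Bool.and_eq_true, not_and] at hc'
      simp
      intro x hx hcp
      exfalso
      have hfind : (List.find? (fun p => p.1 == b) mpm).isSome = true := by
        rw [List.find?_isSome]
        exact ⟨(b, x), hx, by simp⟩
      exact hc' hfind (by simp [hcp])

theorem pvGoA_eq (mpm : List (String × List String)) :
    ∀ (n : Nat) (lines : List String), lines.length ≤ n →
      pvGoA mpm lines = (pvSegR lines).flatMap (fun u =>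
        match u with
        | Sum.inl l => [PySem.Str.rstrip l]
        | Sum.inr b => pvRenderB mpm b) := by
  intro n
  induction n with
  | zero =>
    intro lines h
    have : lines = [] := List.length_eq_zero_iff.mp (Nat.le_zero.mp h)
    subst this
    simp [pvGoA, pvSegR]
  | succ m ih =>
    intro lines h
    match lines with
    | [] => simp [pvGoA, pvSegR]
    | line :: rest =>
      rw [pvGoA]
      by_cases hx : pvIsX line = true
      · have hx' := hx; simp only [pvIsX] at hx'
        rw [if_pos hx', pvSegR_cons_X _ _ hx]
        rw [pvCollectA_eq]
        simp only [List.flatMap_cons]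
        have htail := ih (rest.dropWhile pvPred)
          (Nat.le_trans (List.length_dropWhile_le _ _) (by simpa using h))
        rw [htail]
        have hb := pvBlock_eq mpm line (rest.takeWhile pvPred)
        simp only at hb ⊢
        rw [hb]
      · have hx' := hx; simp only [pvIsX] at hx'
        rw [if_neg hx', pvSegR_cons_nonX _ _ hx]
        simp only [List.flatMap_cons, List.singleton_append]
        rw [ih rest (by simpa using h)]

-- ===== VERDICT (by name: the statement is the Claim_ definition above) =====
theorem rewrite_top_subckt_for_sram_spec : Claim_equal_rewrite_top_subckt_for_sram := by
  intro top_text mpm _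
  unfold Spec_rewrite_top_subckt_for_sram
  unfold rewrite_top_subckt_for_sram rewrite_top_subckt_for_sram_alt
  have h1 := pvSegFold (PySem.Str.splitlines top_text) [] none
  simp only [List.nil_append] at h1
  simp only []
  rw [show ((PySem.Str.splitlines top_text).foldl pvSegStepB ([], none)).1 ++
        (match ((PySem.Str.splitlines top_text).foldl pvSegStepB ([], none)).2 with
          | some p => [Sum.inr p] | none => []) =
      pvSegR (PySem.Str.splitlines top_text) from by
    rw [← h1]; cases ((PySem.Str.splitlines top_text).foldl pvSegStepB ([], none)).2 <;> simp [pvFlush]]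
  rw [pvGoA_eq mpm (PySem.Str.splitlines top_text).length _ le_rfl]
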